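-- pv_equiv track=rewrite | github.com/felix-antonio-sl/kora | scripts/kora_lib/validation.py | find_oversized_primary_chunks
-- ===== SOURCE A (Python) =====
-- DEFAULT_MAX_LINES_PER_PRIMARY_CHUNK = 120
--
-- def find_oversized_primary_chunks(text, max_lines=DEFAULT_MAX_LINES_PER_PRIMARY_CHUNK):
--     lines = text.splitlines()
--     starts = [index for index, line in enumerate(lines) if line.startswith("## ")]
--     findings = []
--     for pos, start in enumerate(starts):
--         end = starts[pos + 1] if pos + 1 < len(starts) else len(lines)
--         size = end - start
--         if size > max_lines:
--             findings.append((lines[start][3:].strip(), size))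
--     return findings
-- ===== SOURCE B (Python) =====
-- DEFAULT_MAX_LINES_PER_PRIMARY_CHUNK = 120
--
-- def find_oversized_primary_chunks(text, max_lines=DEFAULT_MAX_LINES_PER_PRIMARY_CHUNK):
--     lines = text.splitlines()
--     findings = []
--     open_start = None
--     open_title = None
--     for i, line in enumerate(lines):
--         if line.startswith("## "):
--             if open_start is not None:
--                 size = i - open_start
--                 if size > max_lines:
--                     findings.append((open_title, size))
--             open_start = i
--             open_title = line[3:].strip()
--     if open_start is not None:
--         size = len(lines) - open_start
--         if size > max_lines:
--             findings.append((open_title, size))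
--     return findings
-- ===== Notes on version B (the rewrite author's own statement) =====
-- stated objective: alternative
-- what changed: Replaces the collect-all-heading-indices pass plus pairwise indexing into the starts list with a single stateful pass over the lines that keeps the currently open section (start, title) and flushes it at the next heading or at EOF.
import Mathlib
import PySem

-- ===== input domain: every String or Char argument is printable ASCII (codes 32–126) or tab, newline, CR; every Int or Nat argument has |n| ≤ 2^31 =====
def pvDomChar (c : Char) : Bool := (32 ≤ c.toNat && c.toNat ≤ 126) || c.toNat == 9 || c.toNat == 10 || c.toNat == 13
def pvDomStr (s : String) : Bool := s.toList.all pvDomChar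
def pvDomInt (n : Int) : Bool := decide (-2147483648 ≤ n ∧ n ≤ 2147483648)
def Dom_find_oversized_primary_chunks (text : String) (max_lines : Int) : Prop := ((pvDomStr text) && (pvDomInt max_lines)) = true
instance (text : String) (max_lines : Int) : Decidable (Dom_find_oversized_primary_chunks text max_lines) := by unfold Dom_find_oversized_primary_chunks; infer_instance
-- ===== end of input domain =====

-- B replaces A's collect-heading-indices-then-pair-consecutive scheme with a single stateful pass
-- that keeps the open section (start, title) and flushes it at the next heading or at EOF (alternative, same cost).

-- ===== PORT A =====
def find_oversized_primary_chunks (text : String) (max_lines : Int) : List (String × Int) :=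
  let lines := PySem.Str.splitlines text
  let starts := ((PySem.List.enumerate lines).filter (fun p => PySem.Str.startswith p.2 "## ")).map (fun p => p.1)
  (PySem.List.enumerate starts).foldl (fun findings q =>
    let endI : Int := if q.1 + 1 < (starts.length : Int) then PySem.List.pyGetD starts (q.1 + 1) 0 else (lines.length : Int)
    let size := endI - q.2
    -- lines[start]: start always comes from enumerate(lines), so it is in range; pyGetD's default "" is unreachable
    if max_lines < size then
      findings ++ [(PySem.Str.strip (PySem.Str.slice (PySem.List.pyGetD lines q.2 "") (some 3) none), size)]
    else findings) []

-- ===== PORT B =====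
def pcAltStep (maxL : Int) (st : Option (Int × String) × List (String × Int)) (p : Int × String) :
    Option (Int × String) × List (String × Int) :=
  if PySem.Str.startswith p.2 "## " then
    (some (p.1, PySem.Str.strip (PySem.Str.slice p.2 (some 3) none)),
     match st.1 with
     | some (s, t) => if maxL < p.1 - s then st.2 ++ [(t, p.1 - s)] else st.2
     | none => st.2)
  else st

def find_oversized_primary_chunks_alt (text : String) (max_lines : Int) : List (String × Int) :=
  let lines := PySem.Str.splitlines text
  let r := (PySem.List.enumerate lines).foldl (pcAltStep max_lines) (none, [])
  match r.1 with
  | some (s, t) =>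
      if max_lines < (lines.length : Int) - s then r.2 ++ [(t, (lines.length : Int) - s)] else r.2
  | none => r.2

-- ===== PRECONDITION & SPEC =====
def Spec_find_oversized_primary_chunks (text : String) (max_lines : Int) (out : List (String × Int)) : Prop := out = find_oversized_primary_chunks_alt text max_lines
instance (text : String) (max_lines : Int) (out : List (String × Int)) : Decidable (Spec_find_oversized_primary_chunks text max_lines out) := by unfold Spec_find_oversized_primary_chunks; infer_instance

-- ===== CLAIM (what is proved, stated in full; the proofs are below) =====
def Claim_equal_find_oversized_primary_chunks : Prop := ∀ (text : String) (max_lines : Int), Dom_find_oversized_primary_chunks text max_lines → Spec_find_oversized_primary_chunks text max_lines (find_oversized_primary_chunks text max_lines)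

-- ===== LEMMAS AND PROOFS =====

-- proof-side helpers
def pcTitle (l : String) : String := PySem.Str.strip (PySem.Str.slice l (some 3) none)

def pcOut (maxL s e : Int) (t : String) : List (String × Int) :=
  if maxL < e - s then [(t, e - s)] else []

-- consecutive-difference spec over the list of heading indices (A's shape)
def pcSpecA (lines : List String) (maxL n : Int) : List Int → List (String × Int)
  | [] => []
  | s :: rest =>
      pcOut maxL s (match rest with | [] => n | y :: _ => y)
        (pcTitle (PySem.List.pyGetD lines s "")) ++ pcSpecA lines maxL n rest

-- B's fold over the heading pairs, with the open section as state (B's shape)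
def pcF (maxL n : Int) : Option (Int × String) → List (Int × String) → List (String × Int)
  | none, [] => []
  | none, (i, l) :: rest => pcF maxL n (some (i, pcTitle l)) rest
  | some (s, t), [] => pcOut maxL s n t
  | some (s, t), (i, l) :: rest => pcOut maxL s i t ++ pcF maxL n (some (i, pcTitle l)) rest

-- the then-branch of pcAltStep, as its own function
def pcGo (maxL : Int) (st : Option (Int × String) × List (String × Int)) (p : Int × String) :
    Option (Int × String) × List (String × Int) :=
  (some (p.1, pcTitle p.2),
   match st.1 with
   | some (s, t) => st.2 ++ pcOut maxL s p.1 t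
   | none => st.2)

def pcFlush (maxL n : Int) (r : Option (Int × String) × List (String × Int)) : List (String × Int) :=
  match r.1 with
  | some (s, t) => r.2 ++ pcOut maxL s n t
  | none => r.2

lemma pcAltStep_eq (maxL : Int) :
    pcAltStep maxL = fun st p => if PySem.Str.startswith p.2 "## " then pcGo maxL st p else st := by
  funext st p
  unfold pcAltStep pcGo pcTitle pcOut
  rcases st with ⟨o, fs⟩
  rcases o with _ | ⟨s, t⟩
  · simp
  · simp
    split_ifs <;> simp

lemma pcB_loop (maxL n : Int) (H : List (Int × String)) :
    ∀ st acc, pcFlush maxL n (H.foldl (pcGo maxL) (st, acc)) = acc ++ pcF maxL n st H := by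
  induction H with
  | nil =>
      intro st acc
      rcases st with _ | ⟨s, t⟩ <;> simp [pcFlush, pcF]
  | cons p rest ih =>
      rcases p with ⟨i, l⟩
      intro st acc
      rcases st with _ | ⟨s, t⟩
      · simpa [pcGo, pcF] using ih (some (i, pcTitle l)) acc
      · simp only [List.foldl_cons, pcGo, pcF]
        rw [ih (some (i, pcTitle l)) (acc ++ pcOut maxL s i t)]
        simp

lemma pcA_loop (lines : List String) (maxL : Int) (full : List Int) :
    ∀ (suffix : List Int) (k : Nat) (acc : List (String × Int)), full.drop k = suffix →
    (PySem.List.enumerate suffix (k : Int)).foldl (fun findings q =>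
      let endI : Int := if q.1 + 1 < (full.length : Int) then PySem.List.pyGetD full (q.1 + 1) 0 else (lines.length : Int)
      let size := endI - q.2
      if maxL < size then
        findings ++ [(PySem.Str.strip (PySem.Str.slice (PySem.List.pyGetD lines q.2 "") (some 3) none), size)]
      else findings) acc
    = acc ++ pcSpecA lines maxL (lines.length : Int) suffix := by
  intro suffix
  induction suffix with
  | nil => intro k acc h; simp [PySem.List.enumerate_nil, pcSpecA]
  | cons s rest ih =>
      intro k acc h
      have hlen : full.length = k + 1 + rest.length := by
        have h2 : k ≤ full.length := by
          by_contra hk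
          have : full.drop k = [] := List.drop_eq_nil_of_le (by omega)
          rw [this] at h; exact absurd h (by simp)
        have h1 := congrArg List.length h
        simp [List.length_drop] at h1
        omega
      have hdrop1 : full.drop (k + 1) = rest := by
        rw [← List.tail_drop, h]
        rfl
      rw [PySem.List.enumerate_cons, List.foldl_cons]
      cases rest with
      | nil =>
          have hcond : ¬ ((k : Int) + 1 < (full.length : Int)) := by
            simp at hlen
            omega
          rw [PySem.List.enumerate_nil]
          simp only [List.foldl_nil, hcond, if_false, pcSpecA, pcTitle, pcOut]
          split_ifs <;> simp
      | cons y rest2 =>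
          have hcond : ((k : Int) + 1 < (full.length : Int)) := by
            simp at hlen
            omega
          have hget : PySem.List.pyGetD full ((k : Int) + 1) 0 = y := by
            have hcast : (k : Int) + 1 = ((k + 1 : Nat) : Int) := by push_cast; ring
            rw [hcast, PySem.List.pyGetD_natCast]
            have hx : (full.drop (k + 1))[0]? = full[(k + 1) + 0]? := List.getElem?_drop ..
            rw [hdrop1] at hx
            simp at hx
            simp [List.getD, ← hx]
          have hih := ih (k + 1) (acc ++ pcOut maxL s y (pcTitle (PySem.List.pyGetD lines s ""))) hdrop1
          have hcast : ((k + 1 : Nat) : Int) = (k : Int) + 1 := by push_cast; ring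
          rw [hcast] at hih
          simp only [hcond, if_true, hget] at *
          split_ifs with hc
          · have hacc : acc ++ pcOut maxL s y (pcTitle (PySem.List.pyGetD lines s "")) =
                acc ++ [(PySem.Str.strip (PySem.Str.slice (PySem.List.pyGetD lines s "") (some 3) none), y - s)] := by
              simp [pcOut, pcTitle, hc]
            rw [hacc] at hih
            rw [hih]
            simp [pcSpecA, pcOut, pcTitle, hc]
          · have hacc : acc ++ pcOut maxL s y (pcTitle (PySem.List.pyGetD lines s "")) = acc := by
              simp [pcOut, hc]
            rw [hacc] at hih
            rw [hih]
            simp [pcSpecA, pcOut, pcTitle, hc]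

lemma pcF_some (lines : List String) (maxL n : Int) (H : List (Int × String))
    (hmem : ∀ p ∈ H, PySem.List.pyGetD lines p.1 "" = p.2) :
    ∀ (s : Int) (l : String), PySem.List.pyGetD lines s "" = l →
    pcF maxL n (some (s, pcTitle l)) H = pcSpecA lines maxL n (s :: H.map (fun p => p.1)) := by
  induction H with
  | nil => intro s l hl; simp [pcF, pcSpecA, hl]
  | cons p rest ih =>
      rcases p with ⟨i, m⟩
      intro s l hl
      have hi : PySem.List.pyGetD lines i "" = m := hmem (i, m) (by simp)
      have := ih (fun q hq => hmem q (by simp [hq])) i m hi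
      simp only [pcF, pcSpecA, List.map_cons, this, hl]

lemma pcF_none (lines : List String) (maxL n : Int) (H : List (Int × String))
    (hmem : ∀ p ∈ H, PySem.List.pyGetD lines p.1 "" = p.2) :
    pcF maxL n none H = pcSpecA lines maxL n (H.map (fun p => p.1)) := by
  cases H with
  | nil => simp [pcF, pcSpecA]
  | cons p rest =>
      rcases p with ⟨i, m⟩
      have hi : PySem.List.pyGetD lines i "" = m := hmem (i, m) (by simp)
      simp only [pcF, List.map_cons]
      exact pcF_some lines maxL n rest (fun q hq => hmem q (by simp [hq])) i m hi

lemma pc_hmem (lines : List String) :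
    ∀ p ∈ (PySem.List.enumerate lines).filter (fun p => PySem.Str.startswith p.2 "## "),
      PySem.List.pyGetD lines p.1 "" = p.2 := by
  intro p hp
  have hp' : p ∈ PySem.List.enumerate lines := List.mem_of_mem_filter hp
  rw [PySem.List.mem_enumerate_iff] at hp'
  obtain ⟨k, hk, rfl⟩ := hp'
  simp [List.getD, hk]

-- ===== VERDICT (by name: the statement is the Claim_ definition above) =====
theorem find_oversized_primary_chunks_spec : Claim_equal_find_oversized_primary_chunks := by
  intro text max_lines _
  unfold Spec_find_oversized_primary_chunks
  simp only [find_oversized_primary_chunks, find_oversized_primary_chunks_alt]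
  set lines := PySem.Str.splitlines text with hlines
  set H := (PySem.List.enumerate lines).filter (fun p => PySem.Str.startswith p.2 "## ") with hH
  -- A side
  have hA := pcA_loop lines max_lines (H.map (fun p => p.1)) (H.map (fun p => p.1)) 0 [] (by simp)
  simp only [Nat.cast_zero] at hA
  rw [hA]
  -- B side
  rw [pcAltStep_eq max_lines, ← List.foldl_filter, ← hH]
  have hB := pcB_loop max_lines (lines.length : Int) H none []
  have hflush : ∀ r : Option (Int × String) × List (String × Int),
      (match r.1 with
       | some (s, t) => if max_lines < (lines.length : Int) - s then r.2 ++ [(t, (lines.length : Int) - s)] else r.2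
       | none => r.2) = pcFlush max_lines (lines.length : Int) r := by
    intro r
    rcases r with ⟨o, fs⟩
    rcases o with _ | ⟨s, t⟩
    · simp [pcFlush]
    · simp only [pcFlush, pcOut]
      split_ifs <;> simp
  rw [hflush, hB, pcF_none lines max_lines (lines.length : Int) H (pc_hmem lines)]
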